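/-
  jsmn_s.bin, `jsmn_parse_string`: the inner loop (head 1001D7H) — the up-to-4 hex digits after `\u`.
-/
import Prog.Jsmn.S.StrEsc

namespace X86
namespace J6
namespace S
namespace Str
open X86.User (CodeAt RegsKept Span FlagsOK Layout toNat_add_ofNat toNat_ofNat_lt' add_ofNat_add)
open Jsmn JsmnSBytes

set_option maxRecDepth 100000
set_option maxHeartbeats 4000000
set_option linter.unusedSimpArgs false
set_option linter.unusedVariables false

variable {c : SCtx} {n : User.Layout} {v0 v : User.State}

/-- 1001D7H, one trip: `i < 4`, `pos < len` → a NUL ends the digits (`pos--`, 100221H) | a hex digit (back at 1001D7H with i + 1, pos + 1) | anything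
else: JSMN_ERROR_INVAL (1001CAH). -/
theorem hex_body (he : Entry c n v0) {i h : Nat} (ha : AtHex c n v0 v i h) (hi : i < 4) (hh : h < c.js.length) :
    Reach n v (fun v' =>
      (more c.js h = false ∧ At c n v0 v' 0x100221 (u32 ((h : Int) - 1))) ∨
      (more c.js h = true ∧ isHex (charAt c.js h) = true ∧ AtHex c n v0 v' (i + 1) (u32 ((h : Int) + 1))) ∨
      (more c.js h = true ∧ isHex (charAt c.js h) = false ∧ AtRet c n v0 v' JSMN_ERROR_INVAL c.p c.toks)) := by
  obtain ⟨hp, hr8⟩ := he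
  obtain ⟨⟨hrip, hf⟩, hrcx⟩ := ha
  have hW := hp.toksW
  v3_open hp hf hW
  j6_bin
  have hh32 : h < 2 ^ 32 := hf_core_parser_pos ▸ User.Mem.readLE4_lt _ _
  have hpos : c.p.pos < 2 ^ 32 := hp_parser_pos ▸ User.Mem.readLE4_lt _ _
  have hch := char_read hf_text h hh
  have hc8 := (charAt c.js h).toNat_lt
  have hlow : Word.low .w32 (UInt64.ofNat h) = UInt64.ofNat h := Word.low_of_lt _ (by show (UInt64.ofNat h).toNat < 2 ^ 32; v3_omega)
  have hlowp : Word.low .w32 (UInt64.ofNat c.p.pos) = UInt64.ofNat c.p.pos :=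
    Word.low_of_lt _ (by show (UInt64.ofNat c.p.pos).toNat < 2 ^ 32; v3_omega)
  v3_walk hf_core_code hp.call.fetch [hlow, hlowp] until [0x1001ca, 0x100221, 0x1001d7]
  · -- a NUL: `pos--`
    have h0 : (charAt c.js h).toNat = 0 := by v3_omega
    refine Reach.done (Or.inl ⟨more_false_nul h0, by simp, ?_⟩)
    strs_frame
    rw [u32_pred]
    v3_read
  · -- 0-9 or A-F
    have h0 : (charAt c.js h).toNat ≠ 0 := by v3_omega
    have hP := (setcc_and_setcc_eq_zero _ _).mp hbr_100208
    have hx : (48 ≤ (charAt c.js h).toNat ∧ (charAt c.js h).toNat ≤ 57) ∨ (65 ≤ (charAt c.js h).toNat ∧ (charAt c.js h).toNat ≤ 70) := by v3_omega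
    have hi' : Word.low .w32 (UInt64.ofNat i + 1) = UInt64.ofNat (i + 1) := by v3_omega
    refine Reach.done (Or.inr (Or.inl ⟨more_true hh h0, (hex_iff _).mpr (by omega), ⟨by simp, ?_⟩, by v3_regnorm; exact hi'⟩))
    strs_frame
    rw [u32_succ]
    v3_read
  · -- a-f
    have h0 : (charAt c.js h).toNat ≠ 0 := by v3_omega
    have hx : 97 ≤ (charAt c.js h).toNat ∧ (charAt c.js h).toNat ≤ 102 := by v3_omega
    have hi' : Word.low .w32 (UInt64.ofNat i + 1) = UInt64.ofNat (i + 1) := by v3_omega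
    refine Reach.done (Or.inr (Or.inl ⟨more_true hh h0, (hex_iff _).mpr (by omega), ⟨by simp, ?_⟩, by v3_regnorm; exact hi'⟩))
    strs_frame
    rw [u32_succ]
    v3_read
  · -- not a hex digit
    have h0 : (charAt c.js h).toNat ≠ 0 := by v3_omega
    have hP := mt (setcc_and_setcc_eq_zero _ _).mpr hbr_100208
    have hx : ¬ ((48 ≤ (charAt c.js h).toNat ∧ (charAt c.js h).toNat ≤ 57) ∨ (65 ≤ (charAt c.js h).toNat ∧ (charAt c.js h).toNat ≤ 70) ∨
        (97 ≤ (charAt c.js h).toNat ∧ (charAt c.js h).toNat ≤ 102)) := by v3_omega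
    have hnh : isHex (charAt c.js h) = false := by
      cases e : isHex (charAt c.js h) with
      | false => rfl
      | true => exact absurd ((hex_iff _).mp e) hx
    exact Reach.done (Or.inr (Or.inr ⟨more_true hh h0, hnh, by strs_fail⟩))

/-- 1001D7H → 100221H when the loop ends without looking at a character (four digits read, or the text exhausted): `pos--`. -/
theorem hex_exit (he : Entry c n v0) {i h : Nat} (ha : AtHex c n v0 v i h) (hi : i ≤ 4) (hx : i = 4 ∨ c.js.length ≤ h) :
    Reach n v (fun v' => At c n v0 v' 0x100221 (u32 ((h : Int) - 1))) := by
  obtain ⟨hp, hr8⟩ := he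
  obtain ⟨⟨hrip, hf⟩, hrcx⟩ := ha
  have hW := hp.toksW
  v3_open hp hf hW
  j6_bin
  have hh32 : h < 2 ^ 32 := hf_core_parser_pos ▸ User.Mem.readLE4_lt _ _
  have hlow : Word.low .w32 (UInt64.ofNat h) = UInt64.ofNat h := Word.low_of_lt _ (by show (UInt64.ofNat h).toNat < 2 ^ 32; v3_omega)
  v3_walk hf_core_code hp.call.fetch [hlow] until [0x1001ca, 0x100221, 0x1001d7]
  iterate 2
    · refine Reach.done ⟨by simp, ?_⟩
      strs_frame
      rw [u32_pred]
      v3_read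
  all_goals (exfalso; v3_omega)

end Str
end S
end J6
end X86
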